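-- pv_equiv track=rewrite | github.com/Khawla-1006/PythonVScode | part04-11_first_second_last/src/first_second_last.py | second_word
-- ===== SOURCE A (Python) =====
-- def first_word(sentence) :
--     i = 0
--     while i < len(sentence) :
--         if sentence[i] == " " :
--             break
--         i += 1
--     return(sentence[0 : i])
--
-- def second_word(sentence) :
--     first = first_word(sentence)
--     i = len(first) + 1
--     while i < len(sentence) :
--         if sentence[i] == " " :
--             break
--         i += 1
--     return(sentence[len(first) + 1 : i ])
-- ===== SOURCE B (Python) =====
-- def second_word(sentence):
--     parts = sentence.split(" ")
--     return parts[1] if len(parts) > 1 else ""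
-- ===== Notes on version B (the rewrite author's own statement) =====
-- stated objective: idiomatic
-- what changed: B tokenizes the sentence once with sentence.split(" ") and returns the second token guarded by a length check, replacing A's two manual index-scanning while loops and slicing; the C-implemented split gives a large constant-factor speedup over A's per-character Python loop.
import Mathlib
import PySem

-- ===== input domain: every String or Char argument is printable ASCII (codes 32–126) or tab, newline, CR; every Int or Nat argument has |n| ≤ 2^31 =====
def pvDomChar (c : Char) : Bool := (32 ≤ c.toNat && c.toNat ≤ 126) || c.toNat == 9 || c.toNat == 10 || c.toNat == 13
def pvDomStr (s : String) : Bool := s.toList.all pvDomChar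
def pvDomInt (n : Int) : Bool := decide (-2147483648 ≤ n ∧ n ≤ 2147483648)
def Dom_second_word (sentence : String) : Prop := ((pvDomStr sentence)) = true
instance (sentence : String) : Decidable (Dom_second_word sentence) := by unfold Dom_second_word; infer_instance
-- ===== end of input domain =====

-- B tokenizes the whole string once with split(" ") and indexes the second token,
-- instead of A's two manual index-scanning while loops (objective: idiomatic).


-- ===== PORT A =====
-- A's while loop 'while i < len(sentence): if sentence[i] == " ": break; i += 1',
-- shared verbatim by first_word and second_word; returns the final value of i.
def spaceScan (s : List Char) (i : Nat) : Nat :=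
  if h : i < s.length then
    if s[i] = ' ' then i else spaceScan s (i + 1)
  else i
termination_by s.length - i

def first_word (s : List Char) : List Char :=
  PySem.List.slice s (some 0) (some ((spaceScan s 0 : Nat) : Int))

def second_word (sentence : String) : String :=
  let s := sentence.toList
  let first := first_word s
  let i := spaceScan s (first.length + 1)
  String.ofList (PySem.List.slice s (some ((first.length : Int) + 1)) (some ((i : Nat) : Int)))

-- ===== PORT B =====
-- parts = sentence.split(" "); return parts[1] if len(parts) > 1 else ""
def second_word_alt (sentence : String) : String :=
  let parts := (sentence.toList.splitOn ' ').map String.ofList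
  if h : 1 < parts.length then parts[1] else ""

-- ===== PRECONDITION & SPEC =====
def Spec_second_word (sentence : String) (out : String) : Prop := out = second_word_alt sentence
instance (sentence : String) (out : String) : Decidable (Spec_second_word sentence out) := by unfold Spec_second_word; infer_instance

-- ===== CLAIM (what is proved, stated in full; the proofs are below) =====
def Claim_equal_second_word : Prop := ∀ (sentence : String), Dom_second_word sentence → Spec_second_word sentence (second_word sentence)

-- ===== LEMMAS AND PROOFS =====

-- index of the first space (= length if none): what spaceScan computes from position 0
def fsp : List Char → Nat
  | [] => 0
  | c :: r => if c = ' ' then 0 else fsp r + 1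

theorem fsp_le (s : List Char) : fsp s ≤ s.length := by
  induction s with
  | nil => simp [fsp]
  | cons c r ih =>
    by_cases h : c = ' '
    · simp [fsp, h]
    · simp [fsp, h]; omega

theorem spaceScan_eq (s : List Char) (i : Nat) : spaceScan s i = i + fsp (s.drop i) := by
  fun_induction spaceScan s i with
  | case1 i h hsp =>
    rw [List.drop_eq_getElem_cons h]
    simp [fsp, hsp]
  | case2 i h hsp ih =>
    rw [List.drop_eq_getElem_cons h, ih]
    simp [fsp, hsp]; omega
  | case3 i h =>
    rw [List.drop_eq_nil_iff.mpr (by omega)]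
    simp [fsp]

theorem splitOnP_head (t : List Char) :
    (List.splitOnP (· == ' ') t).head? = some (t.take (fsp t)) := by
  induction t with
  | nil => simp [List.splitOnP_nil, fsp]
  | cons c r ih =>
    rw [List.splitOnP_cons]
    by_cases h : c = ' '
    · simp [h, fsp]
    · have hne := List.splitOnP_ne_nil (· == ' ') r
      obtain ⟨a, as, hL⟩ := List.exists_cons_of_ne_nil hne
      simp [h, fsp, hL] at ih ⊢
      exact ih

theorem splitOnP_no_space (s : List Char) (h : fsp s = s.length) :
    List.splitOnP (· == ' ') s = [s] := by
  induction s with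
  | nil => simp [List.splitOnP_nil]
  | cons c r ih =>
    rw [List.splitOnP_cons]
    by_cases hc : c = ' '
    · simp [fsp, hc] at h
    · simp [fsp, hc] at h
      rw [ih h]
      simp [hc]

theorem splitOnP_space (s : List Char) (h : fsp s < s.length) :
    List.splitOnP (· == ' ') s =
      s.take (fsp s) :: List.splitOnP (· == ' ') (s.drop (fsp s + 1)) := by
  induction s with
  | nil => simp at h
  | cons c r ih =>
    rw [List.splitOnP_cons]
    by_cases hc : c = ' '
    · simp [fsp, hc]
    · simp [fsp, hc] at h ⊢
      rw [ih (by omega)]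
      simp

theorem first_word_length (s : List Char) : (first_word s).length = fsp s := by
  have hk := fsp_le s
  unfold first_word
  rw [spaceScan_eq]
  simp [PySem.List.slice_to_natCast]
  omega

theorem second_word_eq (s : List Char) :
    second_word (String.ofList s) = second_word_alt (String.ofList s) := by
  have hs : (String.ofList s).toList = s := by simp
  have hk := fsp_le s
  unfold second_word second_word_alt
  dsimp only
  rw [hs, first_word_length, List.splitOn]
  rcases lt_or_eq_of_le hk with hlt | heq
  · -- a space exists: A extracts the run after it, B indexes token 1
    rw [splitOnP_space s hlt]
    have hne := List.splitOnP_ne_nil (· == ' ') (s.drop (fsp s + 1))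
    obtain ⟨a, as, hL⟩ := List.exists_cons_of_ne_nil hne
    have hhead := splitOnP_head (s.drop (fsp s + 1))
    rw [hL] at hhead
    simp only [List.head?_cons, Option.some.injEq] at hhead
    rw [spaceScan_eq]
    have hcast : ((fsp s : Int) + 1) = (((fsp s + 1 : Nat)) : Int) := by push_cast; ring
    rw [hcast, PySem.List.slice_natCast]
    simp [hL, hhead]
  · -- no space: A slices past the end (empty), B has a single token
    rw [splitOnP_no_space s heq]
    rw [spaceScan_eq, List.drop_eq_nil_iff.mpr (by omega)]
    have hcast : ((fsp s : Int) + 1) = (((fsp s + 1 : Nat)) : Int) := by push_cast; ring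
    rw [hcast, PySem.List.slice_natCast]
    simp [fsp]

-- ===== VERDICT (by name: the statement is the Claim_ definition above) =====
theorem second_word_spec : Claim_equal_second_word := by
  intro sentence _
  unfold Spec_second_word
  have h := second_word_eq sentence.toList
  simpa using h
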